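-- pv_equiv track=rewrite | github.com/buchasia/advent-of-code | 2015/D06/D06.py | findLightPattern
-- ===== SOURCE A (Python) =====
-- def partOne(x, y, lights, action):
--     toogle = {1: 0, 0: 1}
--     if action == 'toggle':
--         lights[(x, y)] = toogle[lights[(x, y)]]
--     elif action == 'turn off':
--         lights[(x, y)] = 0
--     elif action == 'turn on':
--         lights[(x, y)] = 1
--
-- def partTwo(x, y, lights, action):
--     if action == 'toggle':
--         lights[(x, y)] += 2
--     elif action == 'turn off':
--         lights[(x, y)] = max(0, lights[(x, y)] - 1)
--     elif action == 'turn on':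
--         lights[(x, y)] += 1
--
-- def findLightPattern(inputData, p2 = True):
--     lights = {}
--     for line in inputData:
--         for x in range(int(line[1]), int(line[3]) + 1):
--             for y in range(int(line[2]), int(line[4]) + 1):
--                 if (x, y) not in lights:
--                     lights[(x, y)] = 0
--                 if p2 == False:
--                     partOne(x, y, lights, line[0])
--                 else:
--                     partTwo(x, y, lights, line[0])
--
--     return sum(lights.values())
-- ===== SOURCE B (Python) =====
-- def findLightPattern(inputData, p2 = True):
--     # Cell-major re-implementation: no mutable grid dict; for each covered cell,
--     # fold its final brightness directly over the instruction list, then sum.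
--     def step(v, action):
--         if p2 == False:
--             if action == 'toggle':
--                 return 1 - v
--             elif action == 'turn off':
--                 return 0
--             elif action == 'turn on':
--                 return 1
--             return v
--         else:
--             if action == 'toggle':
--                 return v + 2
--             elif action == 'turn off':
--                 return max(0, v - 1)
--             elif action == 'turn on':
--                 return v + 1
--             return v
--
--     cells = {(x, y)
--              for _, x1, y1, x2, y2 in inputData
--              for x in range(x1, x2 + 1)
--              for y in range(y1, y2 + 1)}
--     total = 0
--     for (x, y) in cells:
--         v = 0
--         for action, x1, y1, x2, y2 in inputData:
--             if x1 <= x <= x2 and y1 <= y <= y2: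
--                 v = step(v, action)
--         total += v
--     return total
-- ===== Notes on version B (the rewrite author's own statement) =====
-- stated objective: alternative
-- what changed: B is cell-major instead of instruction-major: it drops A's mutable grid dict and instead, for each covered cell, folds that cell's final brightness directly over the instruction list, summing as it goes.
import Mathlib
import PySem

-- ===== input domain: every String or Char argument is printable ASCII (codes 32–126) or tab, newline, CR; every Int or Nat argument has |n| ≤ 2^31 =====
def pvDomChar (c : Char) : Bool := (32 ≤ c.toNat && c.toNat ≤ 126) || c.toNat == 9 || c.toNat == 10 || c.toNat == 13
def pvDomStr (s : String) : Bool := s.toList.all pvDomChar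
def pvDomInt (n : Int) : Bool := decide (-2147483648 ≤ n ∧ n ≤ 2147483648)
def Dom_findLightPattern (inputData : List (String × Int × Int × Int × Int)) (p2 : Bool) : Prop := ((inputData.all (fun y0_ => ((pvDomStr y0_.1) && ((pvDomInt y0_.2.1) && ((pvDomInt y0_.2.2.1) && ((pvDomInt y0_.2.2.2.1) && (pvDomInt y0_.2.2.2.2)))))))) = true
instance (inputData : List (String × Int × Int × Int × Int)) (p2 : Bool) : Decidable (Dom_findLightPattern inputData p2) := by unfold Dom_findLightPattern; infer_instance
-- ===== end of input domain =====

-- B re-implements A cell-major (per-cell fold over the instruction list, no mutable grid dict); same results, objective: alternative.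
-- Both Pythons consume their dict/set ONLY via key lookup/insert/membership and an order-independent
-- sum, so the ports model them with ordered trees (Std.TreeMap / Std.TreeSet): iteration order is
-- never observed by either program, and every lookup/update is exact.

-- lexicographic comparison on cells (Python tuple keys)
abbrev pvCmp : Int × Int → Int × Int → Ordering :=
  compareLex (compareOn (·.1)) (compareOn (·.2))

-- ===== PORT A =====
-- lights[(x, y)] is always a present key when partOne/partTwo run (the caller inserts 0 first),
-- and under part one its value is always 0 or 1, so the `.getD … 0` defaults are never taken
-- (Python's KeyError is unreachable).
def partOnePort (x y : Int) (lights : Std.TreeMap (Int × Int) Int pvCmp) (action : String) :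
    Std.TreeMap (Int × Int) Int pvCmp :=
  let toogle : Std.TreeMap Int Int := ((∅ : Std.TreeMap Int Int).insert 1 0).insert 0 1
  if action == "toggle" then
    lights.insert (x, y) ((toogle.get? (lights.getD (x, y) 0)).getD 0)
  else if action == "turn off" then
    lights.insert (x, y) 0
  else if action == "turn on" then
    lights.insert (x, y) 1
  else lights

def partTwoPort (x y : Int) (lights : Std.TreeMap (Int × Int) Int pvCmp) (action : String) :
    Std.TreeMap (Int × Int) Int pvCmp :=
  if action == "toggle" then
    lights.insert (x, y) (lights.getD (x, y) 0 + 2)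
  else if action == "turn off" then
    lights.insert (x, y) (max 0 (lights.getD (x, y) 0 - 1))
  else if action == "turn on" then
    lights.insert (x, y) (lights.getD (x, y) 0 + 1)
  else lights

def findLightPattern (inputData : List (String × Int × Int × Int × Int)) (p2 : Bool) : Int :=
  -- int(line[i]) on an int is the identity and is dropped
  let lights : Std.TreeMap (Int × Int) Int pvCmp :=
    inputData.foldl (fun lights line =>
      (PySem.List.pyRange line.2.1 (line.2.2.2.1 + 1) 1).foldl (fun lights x =>
        (PySem.List.pyRange line.2.2.1 (line.2.2.2.2 + 1) 1).foldl (fun lights y =>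
          let lights' := if lights.contains (x, y) then lights else lights.insert (x, y) 0
          if p2 == false then partOnePort x y lights' line.1 else partTwoPort x y lights' line.1)
          lights)
        lights)
      ∅
  -- sum(lights.values())
  lights.foldl (fun acc _ v => acc + v) 0

-- ===== PORT B =====
def stepAlt (p2 : Bool) (v : Int) (action : String) : Int :=
  if p2 == false then
    if action == "toggle" then 1 - v
    else if action == "turn off" then 0
    else if action == "turn on" then 1
    else v
  else
    if action == "toggle" then v + 2
    else if action == "turn off" then max 0 (v - 1)
    else if action == "turn on" then v + 1
    else v

def findLightPattern_alt (inputData : List (String × Int × Int × Int × Int)) (p2 : Bool) : Int :=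
  let cells : Std.TreeSet (Int × Int) pvCmp :=
    inputData.foldl (fun cells line =>
      (PySem.List.pyRange line.2.1 (line.2.2.2.1 + 1) 1).foldl (fun cells x =>
        (PySem.List.pyRange line.2.2.1 (line.2.2.2.2 + 1) 1).foldl (fun cells y =>
          cells.insert (x, y))
          cells)
        cells)
      ∅
  cells.foldl (fun total c =>
    total + inputData.foldl (fun v line =>
      if line.2.1 ≤ c.1 ∧ c.1 ≤ line.2.2.2.1 ∧ line.2.2.1 ≤ c.2 ∧ c.2 ≤ line.2.2.2.2
      then stepAlt p2 v line.1 else v) 0) 0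

-- ===== PRECONDITION & SPEC =====
def Spec_findLightPattern (inputData : List (String × Int × Int × Int × Int)) (p2 : Bool) (out : Int) : Prop := out = findLightPattern_alt inputData p2
instance (inputData : List (String × Int × Int × Int × Int)) (p2 : Bool) (out : Int) : Decidable (Spec_findLightPattern inputData p2 out) := by unfold Spec_findLightPattern; infer_instance

-- ===== CLAIM (what is proved, stated in full; the proofs are below) =====
def Claim_equal_findLightPattern : Prop := ∀ (inputData : List (String × Int × Int × Int × Int)) (p2 : Bool), Dom_findLightPattern inputData p2 → Spec_findLightPattern inputData p2 (findLightPattern inputData p2)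

-- ===== LEMMAS AND PROOFS =====

theorem pvCmp_eq_iff (a b : Int × Int) : pvCmp a b = Ordering.eq ↔ a = b := by
  unfold pvCmp compareLex compareOn
  rcases a with ⟨a1, a2⟩
  rcases b with ⟨b1, b2⟩
  cases h1 : compare a1 b1 <;>
    simp_all [Ordering.then, Int.compare_eq_lt, Int.compare_eq_gt] <;> omega

theorem pvCmp_lawfulEq : Std.LawfulEqCmp pvCmp := by
  constructor
  intro a b h
  exact (pvCmp_eq_iff a b).mp h

-- one (action, x, y) event per cell a line touches, and its target cell
def evKey (e : String × Int × Int) : Int × Int := (e.2.1, e.2.2)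

def lineEvents (l : String × Int × Int × Int × Int) : List (String × Int × Int) :=
  (PySem.List.pyRange l.2.1 (l.2.2.2.1 + 1) 1).flatMap (fun x =>
    (PySem.List.pyRange l.2.2.1 (l.2.2.2.2 + 1) 1).map (fun y => (l.1, x, y)))

def events (inputData : List (String × Int × Int × Int × Int)) : List (String × Int × Int) :=
  inputData.flatMap lineEvents

-- A's whole inner-loop body, as a function of one event
def bodyA (p2 : Bool) (d : Std.TreeMap (Int × Int) Int pvCmp) (e : String × Int × Int) :
    Std.TreeMap (Int × Int) Int pvCmp :=
  let d' := if d.contains (e.2.1, e.2.2) then d else d.insert (e.2.1, e.2.2) 0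
  if p2 == false then partOnePort e.2.1 e.2.2 d' e.1 else partTwoPort e.2.1 e.2.2 d' e.1

-- A's effect of one event on the brightness of its own cell
def actA (p2 : Bool) (a : String) (v : Int) : Int :=
  if p2 == false then
    if a == "toggle" then
      (((((∅ : Std.TreeMap Int Int).insert 1 0).insert 0 1).get? v).getD 0)
    else if a == "turn off" then 0
    else if a == "turn on" then 1
    else v
  else
    if a == "toggle" then v + 2
    else if a == "turn off" then max 0 (v - 1)
    else if a == "turn on" then v + 1
    else v

-- part-one brightness values stay in {0, 1}
def PInv (p2 : Bool) (v : Int) : Prop := p2 = true ∨ v = 0 ∨ v = 1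

theorem foldl_skip {α} [DecidableEq α] (act : Int → Int) (l : List α) (c : α) (v : Int)
    (h : c ∉ l) : l.foldl (fun v e => if e = c then act v else v) v = v := by
  induction l generalizing v with
  | nil => rfl
  | cons a t ih =>
    simp only [List.mem_cons, not_or] at h
    simp only [List.foldl_cons, if_neg (Ne.symm h.1)]
    exact ih v h.2

theorem foldl_mark {α} [DecidableEq α] (act : Int → Int) (l : List α) (c : α) (v : Int)
    (h : l.Nodup) : l.foldl (fun v e => if e = c then act v else v) v
      = if c ∈ l then act v else v := by
  induction l generalizing v with
  | nil => rfl
  | cons a t ih =>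
    rcases List.nodup_cons.mp h with ⟨ha, ht⟩
    by_cases hac : a = c
    · subst hac
      rw [List.foldl_cons, if_pos rfl, foldl_skip act t a (act v) ha,
        if_pos (List.mem_cons_self)]
    · have hca : ¬ c = a := fun h' => hac h'.symm
      rw [List.foldl_cons, if_neg hac, ih v ht]
      simp [List.mem_cons, hca]

theorem foldl_const {α β} (l : List α) (v : β) : l.foldl (fun v _ => v) v = v := by
  induction l <;> simp_all

-- A's per-cell fold over one line's events applies the line's action once iff the cell is in the rectangle
theorem line_fold (p2 : Bool) (c : Int × Int) (l : String × Int × Int × Int × Int) (v : Int) :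
    (lineEvents l).foldl (fun v e => if evKey e = c then actA p2 e.1 v else v) v
      = if l.2.1 ≤ c.1 ∧ c.1 ≤ l.2.2.2.1 ∧ l.2.2.1 ≤ c.2 ∧ c.2 ≤ l.2.2.2.2
        then actA p2 l.1 v else v := by
  unfold lineEvents
  rw [List.foldl_flatMap]
  have hinner : ∀ (x : Int) (v : Int),
      ((PySem.List.pyRange l.2.2.1 (l.2.2.2.2 + 1) 1).map (fun y => (l.1, x, y))).foldl
        (fun v e => if evKey e = c then actA p2 e.1 v else v) v
      = if x = c.1 ∧ (l.2.2.1 ≤ c.2 ∧ c.2 ≤ l.2.2.2.2) then actA p2 l.1 v else v := by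
    intro x v
    rw [List.foldl_map]
    by_cases hx : x = c.1
    · have hbody : (fun (v : Int) (y : Int) => if evKey (l.1, x, y) = c then actA p2 l.1 v else v)
          = fun v y => if y = c.2 then actA p2 l.1 v else v := by
        funext v y
        by_cases hy : y = c.2
        · subst hx hy
          simp [evKey]
        · simp [evKey, Prod.ext_iff, hy]
      simp only [hbody]
      rw [foldl_mark _ _ _ _ (PySem.List.nodup_pyRange_one _ _)]
      simp only [PySem.List.mem_pyRange_one, hx, true_and]
      exact if_congr (by omega) rfl rfl
    · have hbody : (fun (v : Int) (y : Int) => if evKey (l.1, x, y) = c then actA p2 l.1 v else v)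
          = fun (v : Int) (_ : Int) => v := by
        funext v y
        simp [evKey, Prod.ext_iff, hx]
      simp [hbody, hx]
  simp only [hinner]
  by_cases hcy : l.2.2.1 ≤ c.2 ∧ c.2 ≤ l.2.2.2.2
  · simp only [hcy, and_true]
    rw [foldl_mark _ _ _ _ (PySem.List.nodup_pyRange_one _ _)]
    simp only [PySem.List.mem_pyRange_one]
    exact if_congr (by omega) rfl rfl
  · have hbody : (fun (v : Int) (x : Int) =>
        if x = c.1 ∧ (l.2.2.1 ≤ c.2 ∧ c.2 ≤ l.2.2.2.2) then actA p2 l.1 v else v)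
        = fun (v : Int) (_ : Int) => v := by
      funext v x; simp [hcy]
    rw [hbody, foldl_const]
    have : ¬ (l.2.1 ≤ c.1 ∧ c.1 ≤ l.2.2.2.1 ∧ l.2.2.1 ≤ c.2 ∧ c.2 ≤ l.2.2.2.2) := by tauto
    rw [if_neg this]

theorem toggle_val (v : Int) (h : v = 0 ∨ v = 1) :
    (((((∅ : Std.TreeMap Int Int).insert 1 0).insert 0 1).get? v).getD 0) = 1 - v := by
  rcases h with h | h <;> subst h <;> rfl

theorem act_eq (p2 : Bool) (a : String) (v : Int) (h : PInv p2 v) :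
    actA p2 a v = stepAlt p2 v a := by
  cases p2 with
  | true => rfl
  | false =>
    rcases h with h | h | h
    · exact absurd h (by simp)
    all_goals
      subst h; unfold actA stepAlt
      split_ifs <;> rfl

theorem act_inv (p2 : Bool) (a : String) (v : Int) (h : PInv p2 v) :
    PInv p2 (actA p2 a v) := by
  cases p2 with
  | true => exact Or.inl rfl
  | false =>
    rcases h with h | h | h
    · exact absurd h (by simp)
    · subst h; unfold actA PInv
      split_ifs <;> first | (rw [toggle_val 0 (Or.inl rfl)]; decide) | simp_all
    · subst h; unfold actA PInv
      split_ifs <;> first | (rw [toggle_val 1 (Or.inr rfl)]; decide) | simp_all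

theorem inv_ite (p2 : Bool) (P : Prop) [Decidable P] (a : String) (v : Int) (h : PInv p2 v) :
    PInv p2 (if P then actA p2 a v else v) := by
  split_ifs
  · exact act_inv p2 a v h
  · exact h

-- cell-major equivalence of the two per-cell folds
theorem cell_fold (p2 : Bool) (c : Int × Int) :
    ∀ (data : List (String × Int × Int × Int × Int)) (v : Int), PInv p2 v →
    (data.flatMap lineEvents).foldl (fun v e => if evKey e = c then actA p2 e.1 v else v) v
      = data.foldl (fun v line =>
          if line.2.1 ≤ c.1 ∧ c.1 ≤ line.2.2.2.1 ∧ line.2.2.1 ≤ c.2 ∧ c.2 ≤ line.2.2.2.2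
          then stepAlt p2 v line.1 else v) v := by
  intro data
  induction data with
  | nil => intro v _; rfl
  | cons l t ih =>
    intro v hv
    rw [List.flatMap_cons, List.foldl_append, List.foldl_cons, line_fold]
    have hstep : (if l.2.1 ≤ c.1 ∧ c.1 ≤ l.2.2.2.1 ∧ l.2.2.1 ≤ c.2 ∧ c.2 ≤ l.2.2.2.2
          then actA p2 l.1 v else v)
        = (if l.2.1 ≤ c.1 ∧ c.1 ≤ l.2.2.2.1 ∧ l.2.2.1 ≤ c.2 ∧ c.2 ≤ l.2.2.2.2
          then stepAlt p2 v l.1 else v) := by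
      by_cases hc : l.2.1 ≤ c.1 ∧ c.1 ≤ l.2.2.2.1 ∧ l.2.2.1 ≤ c.2 ∧ c.2 ≤ l.2.2.2.2
      · rw [if_pos hc, if_pos hc, act_eq p2 l.1 v hv]
      · rw [if_neg hc, if_neg hc]
    have hv' : PInv p2 (if l.2.1 ≤ c.1 ∧ c.1 ≤ l.2.2.2.1 ∧ l.2.2.1 ≤ c.2 ∧ c.2 ≤ l.2.2.2.2
        then actA p2 l.1 v else v) :=
      inv_ite p2 (l.2.1 ≤ c.1 ∧ c.1 ≤ l.2.2.2.1 ∧ l.2.2.1 ≤ c.2 ∧ c.2 ≤ l.2.2.2.2) l.1 v hv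
    rw [hstep] at hv' ⊢
    exact ih _ hv'

-- tree-map lemmas for A's loop body
theorem getD_init (d : Std.TreeMap (Int × Int) Int pvCmp) (k c : Int × Int) :
    ((if d.contains k = true then d else d.insert k 0).getD c 0) = d.getD c 0 := by
  by_cases hc : d.contains k = true
  · rw [if_pos hc]
  · rw [if_neg hc, Std.TreeMap.getD_insert]
    by_cases hck : pvCmp k c = Ordering.eq
    · rw [if_pos hck]
      have hk : k = c := (pvCmp_eq_iff k c).mp hck
      subst hk
      exact (Std.TreeMap.getD_eq_fallback_of_contains_eq_false (by simp only [Bool.not_eq_true] at hc; exact hc)).symm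
    · rw [if_neg hck]

theorem getD_partOne (x y : Int) (d : Std.TreeMap (Int × Int) Int pvCmp) (a : String) (c : Int × Int) :
    (partOnePort x y d a).getD c 0
      = if (x, y) = c then actA false a (d.getD (x, y) 0) else d.getD c 0 := by
  unfold partOnePort
  have hact : ∀ v : Int, actA false a v
      = (if a == "toggle" then (((((∅ : Std.TreeMap Int Int).insert 1 0).insert 0 1).get? v).getD 0)
         else if a == "turn off" then 0 else if a == "turn on" then 1 else v) := fun _ => rfl
  rw [hact]
  by_cases hc : (x, y) = c
  · rw [if_pos hc]
    split_ifs <;>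
      first
        | rw [Std.TreeMap.getD_insert, if_pos ((pvCmp_eq_iff _ _).mpr hc)]
        | (subst hc; rfl)
  · rw [if_neg hc]
    split_ifs <;>
      first
        | rw [Std.TreeMap.getD_insert, if_neg (fun he => hc ((pvCmp_eq_iff _ _).mp he))]
        | rfl

theorem getD_partTwo (x y : Int) (d : Std.TreeMap (Int × Int) Int pvCmp) (a : String) (c : Int × Int) :
    (partTwoPort x y d a).getD c 0
      = if (x, y) = c then actA true a (d.getD (x, y) 0) else d.getD c 0 := by
  unfold partTwoPort
  have hact : ∀ v : Int, actA true a v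
      = (if a == "toggle" then v + 2
         else if a == "turn off" then max 0 (v - 1) else if a == "turn on" then v + 1 else v) :=
    fun _ => rfl
  rw [hact]
  by_cases hc : (x, y) = c
  · rw [if_pos hc]
    split_ifs <;>
      first
        | rw [Std.TreeMap.getD_insert, if_pos ((pvCmp_eq_iff _ _).mpr hc)]
        | (subst hc; rfl)
  · rw [if_neg hc]
    split_ifs <;>
      first
        | rw [Std.TreeMap.getD_insert, if_neg (fun he => hc ((pvCmp_eq_iff _ _).mp he))]
        | rfl

theorem getD_bodyA (p2 : Bool) (d : Std.TreeMap (Int × Int) Int pvCmp) (e : String × Int × Int)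
    (c : Int × Int) :
    (bodyA p2 d e).getD c 0
      = if evKey e = c then actA p2 e.1 (d.getD (evKey e) 0) else d.getD c 0 := by
  unfold bodyA
  cases p2 with
  | false =>
    show (partOnePort e.2.1 e.2.2 _ e.1).getD c 0 = _
    rw [getD_partOne, getD_init]
    have hk : evKey e = (e.2.1, e.2.2) := rfl
    rw [hk, getD_init]
  | true =>
    show (partTwoPort e.2.1 e.2.2 _ e.1).getD c 0 = _
    rw [getD_partTwo, getD_init]
    have hk : evKey e = (e.2.1, e.2.2) := rfl
    rw [hk, getD_init]

theorem getD_fold (p2 : Bool) (c : Int × Int) :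
    ∀ (E : List (String × Int × Int)) (d : Std.TreeMap (Int × Int) Int pvCmp),
    (E.foldl (bodyA p2) d).getD c 0
      = E.foldl (fun v e => if evKey e = c then actA p2 e.1 v else v) (d.getD c 0) := by
  intro E
  induction E with
  | nil => intro d; rfl
  | cons e t ih =>
    intro d
    simp only [List.foldl_cons, ih, getD_bodyA]
    by_cases he : evKey e = c <;> simp [he]

-- membership through A's loop body
theorem mem_partOne (x y : Int) (d : Std.TreeMap (Int × Int) Int pvCmp) (a : String)
    (hk : (x, y) ∈ d) (c : Int × Int) : c ∈ partOnePort x y d a ↔ c ∈ d := by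
  unfold partOnePort
  split_ifs <;>
    first
      | (rw [Std.TreeMap.mem_insert]
         constructor
         · rintro (he | hm)
           · exact (pvCmp_eq_iff _ _).mp he ▸ hk
           · exact hm
         · exact Or.inr)
      | exact Iff.rfl

theorem mem_partTwo (x y : Int) (d : Std.TreeMap (Int × Int) Int pvCmp) (a : String)
    (hk : (x, y) ∈ d) (c : Int × Int) : c ∈ partTwoPort x y d a ↔ c ∈ d := by
  unfold partTwoPort
  split_ifs <;>
    first
      | (rw [Std.TreeMap.mem_insert]
         constructor
         · rintro (he | hm)
           · exact (pvCmp_eq_iff _ _).mp he ▸ hk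
           · exact hm
         · exact Or.inr)
      | exact Iff.rfl

theorem mem_bodyA (p2 : Bool) (d : Std.TreeMap (Int × Int) Int pvCmp) (e : String × Int × Int)
    (c : Int × Int) : c ∈ bodyA p2 d e ↔ (evKey e = c ∨ c ∈ d) := by
  unfold bodyA
  have hinit : ∀ c' : Int × Int,
      (c' ∈ (if d.contains (e.2.1, e.2.2) = true then d else d.insert (e.2.1, e.2.2) 0))
        ↔ ((e.2.1, e.2.2) = c' ∨ c' ∈ d) := by
    intro c'
    by_cases hc : d.contains (e.2.1, e.2.2) = true
    · rw [if_pos hc]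
      constructor
      · exact Or.inr
      · rintro (he | hm)
        · exact he ▸ Std.TreeMap.mem_iff_contains.mpr hc
        · exact hm
    · rw [if_neg hc, Std.TreeMap.mem_insert, pvCmp_eq_iff]
  have hk : (e.2.1, e.2.2) ∈ (if d.contains (e.2.1, e.2.2) = true then d
      else d.insert (e.2.1, e.2.2) 0) := (hinit _).mpr (Or.inl rfl)
  cases p2 with
  | false =>
    show c ∈ partOnePort e.2.1 e.2.2 _ e.1 ↔ _
    rw [mem_partOne _ _ _ _ hk, hinit]
    rfl
  | true =>
    show c ∈ partTwoPort e.2.1 e.2.2 _ e.1 ↔ _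
    rw [mem_partTwo _ _ _ _ hk, hinit]
    rfl

theorem mem_foldA (p2 : Bool) :
    ∀ (E : List (String × Int × Int)) (d : Std.TreeMap (Int × Int) Int pvCmp) (c : Int × Int),
    c ∈ E.foldl (bodyA p2) d ↔ (c ∈ d ∨ c ∈ E.map evKey) := by
  intro E
  induction E with
  | nil => intro d c; simp
  | cons e t ih =>
    intro d c
    rw [List.foldl_cons, ih, mem_bodyA, List.map_cons, List.mem_cons]
    tauto

theorem mem_foldB :
    ∀ (ks : List (Int × Int)) (t : Std.TreeSet (Int × Int) pvCmp) (c : Int × Int),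
    c ∈ ks.foldl (fun (s : Std.TreeSet (Int × Int) pvCmp) k => s.insert k) t ↔ (c ∈ t ∨ c ∈ ks) := by
  intro ks
  induction ks with
  | nil => intro t c; simp
  | cons k t ih =>
    intro s c
    rw [List.foldl_cons, ih, Std.TreeSet.mem_insert, pvCmp_eq_iff, List.mem_cons]
    tauto

-- reshaping the ports' nested loops into folds over the flat event list
theorem A_reshape (inputData : List (String × Int × Int × Int × Int)) (p2 : Bool) :
    findLightPattern inputData p2
      = ((events inputData).foldl (bodyA p2) ∅).foldl (fun acc _ v => acc + v) 0 := by
  unfold findLightPattern events lineEvents bodyA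
  simp only [List.foldl_flatMap, List.foldl_map]

theorem B_reshape (inputData : List (String × Int × Int × Int × Int)) (p2 : Bool) :
    findLightPattern_alt inputData p2
      = (((events inputData).map evKey).foldl (fun (s : Std.TreeSet (Int × Int) pvCmp) k => s.insert k) ∅).foldl (fun total c =>
          total + inputData.foldl (fun v line =>
            if line.2.1 ≤ c.1 ∧ c.1 ≤ line.2.2.2.1 ∧ line.2.2.1 ≤ c.2 ∧ c.2 ≤ line.2.2.2.2
            then stepAlt p2 v line.1 else v) 0) 0 := by
  unfold findLightPattern_alt events lineEvents
  simp only [List.map_flatMap, List.map_map, List.foldl_flatMap, List.foldl_map]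
  rfl

-- ===== VERDICT (by name: the statement is the Claim_ definition above) =====
theorem findLightPattern_spec : Claim_equal_findLightPattern := by
  intro inputData p2 _
  unfold Spec_findLightPattern
  haveI : Std.LawfulEqCmp pvCmp := pvCmp_lawfulEq
  rw [A_reshape, B_reshape]
  set M := (events inputData).foldl (bodyA p2) (∅ : Std.TreeMap (Int × Int) Int pvCmp) with hM
  set S := ((events inputData).map evKey).foldl (fun (s : Std.TreeSet (Int × Int) pvCmp) k => s.insert k)
    (∅ : Std.TreeSet (Int × Int) pvCmp) with hS
  set g : Int × Int → Int := fun c => inputData.foldl (fun v line =>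
      if line.2.1 ≤ c.1 ∧ c.1 ≤ line.2.2.2.1 ∧ line.2.2.1 ≤ c.2 ∧ c.2 ≤ line.2.2.2.2
      then stepAlt p2 v line.1 else v) 0 with hg
  -- every stored value equals the per-cell fold of B
  have hval : ∀ c : Int × Int, M.getD c 0 = g c := by
    intro c
    rw [hM, getD_fold, Std.TreeMap.getD_emptyc, hg]
    exact cell_fold p2 c inputData 0 (Or.inr (Or.inl rfl))
  -- A's sum over the map = sum of g over M.keys
  have hA : M.foldl (fun acc _ v => acc + v) 0 = (M.keys.map g).sum := by
    rw [Std.TreeMap.foldl_eq_foldl_toList, PySem.List.foldl_add M.toList (fun p : (Int × Int) × Int => p.2) 0, zero_add]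
    have hsnd : M.toList.map (fun p => p.2) = M.toList.map (fun p => g p.1) := by
      refine List.map_congr_left (fun p hp => ?_)
      have hpair : (p.1, p.2) ∈ M.toList := by simpa using hp
      have hsome : M[p.1]? = some p.2 := Std.TreeMap.mem_toList_iff_getElem?_eq_some.mp hpair
      have : M.getD p.1 0 = p.2 := by
        rw [Std.TreeMap.getD_eq_getD_getElem?, hsome]; rfl
      rw [← this, hval]
    rw [hsnd, ← Std.TreeMap.map_fst_toList_eq_keys, List.map_map]
    rfl
  -- B's fold over the set = sum of g over S.toList
  have hB : S.foldl (fun total c => total + g c) 0 = (S.toList.map g).sum := by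
    rw [Std.TreeSet.foldl_eq_foldl_toList, PySem.List.foldl_add S.toList g 0, zero_add]
  -- the two key lists are equal: same members, both strictly sorted
  have hmem : ∀ c : Int × Int, c ∈ M.keys ↔ c ∈ S.toList := by
    intro c
    rw [Std.TreeMap.mem_keys, Std.TreeSet.mem_toList, hM, hS, mem_foldA, mem_foldB]
    simp [Std.TreeMap.not_mem_emptyc, Std.TreeSet.not_mem_emptyc]
  have hndM : M.keys.Nodup :=
    (Std.TreeMap.distinct_keys (t := M)).imp
      (fun h he => h ((pvCmp_eq_iff _ _).mpr he))
  have hndS : S.toList.Nodup :=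
    (Std.TreeSet.distinct_toList (t := S)).imp
      (fun h he => h ((pvCmp_eq_iff _ _).mpr he))
  have hperm : M.keys.Perm S.toList := (List.perm_ext_iff_of_nodup hndM hndS).mpr hmem
  have hsortM : M.keys.Pairwise (fun a b => pvCmp a b = Ordering.lt) := by
    rw [← Std.TreeMap.map_fst_toList_eq_keys, List.pairwise_map]
    exact Std.TreeMap.ordered_keys_toList
  have hsortS : S.toList.Pairwise (fun a b => pvCmp a b = Ordering.lt) :=
    Std.TreeSet.ordered_toList
  have hkeys : M.keys = S.toList := by
    refine List.Perm.eq_of_pairwise (fun a b _ _ hab hba => ?_) hsortM hsortS hperm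
    have := Std.OrientedCmp.eq_swap (cmp := pvCmp) (a := a) (b := b)
    rw [hab, hba] at this
    exact absurd this (by decide)
  rw [hA, hB, hkeys]
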